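-- pv_equiv track=rewrite | github.com/byqusai/amani | test/simplified_art_direction_agent.py | _determine_emotional_target
-- ===== SOURCE A (Python) =====
-- def _determine_emotional_target(concept: str) -> str:
--     """Determine target emotional response."""
--
--     if any(word in concept for word in ["horror", "scary", "dark"]):
--         return "Fear, tension, unease"
--     elif any(word in concept for word in ["adventure", "explore"]):
--         return "Wonder, curiosity, excitement"
--     elif any(word in concept for word in ["puzzle", "strategy"]):
--         return "Satisfaction, accomplishment"
--     elif any(word in concept for word in ["casual", "relaxing"]):
--         return "Calm, peaceful, meditative"
--     else:
--         return "Engagement, enjoyment"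
-- ===== SOURCE B (Python) =====
-- _KEYWORD_PRIORITY = [
--     ("horror", 0), ("scary", 0), ("dark", 0),
--     ("adventure", 1), ("explore", 1),
--     ("puzzle", 2), ("strategy", 2),
--     ("casual", 3), ("relaxing", 3),
-- ]
--
-- _TARGETS = [
--     "Fear, tension, unease",
--     "Wonder, curiosity, excitement",
--     "Satisfaction, accomplishment",
--     "Calm, peaceful, meditative",
--     "Engagement, enjoyment",
-- ]
--
-- def _determine_emotional_target(concept: str) -> str:
--     """Determine target emotional response."""
--     # Single left-to-right scan over the string: at each position, test which
--     # keywords start there and keep the best (lowest) priority seen so far.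
--     best = 4
--     for i in range(len(concept)):
--         for kw, prio in _KEYWORD_PRIORITY:
--             if prio < best and concept.startswith(kw, i):
--                 best = prio
--     return _TARGETS[best]
-- ===== Notes on version B (the rewrite author's own statement) =====
-- stated objective: alternative
-- what changed: Replaces the keyword-containment elif ladder (a substring search per keyword group) by a single left-to-right scan over the string's positions that tests keyword prefixes at each position and tracks the minimum priority matched, then indexes a target table with it.
import Mathlib
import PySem

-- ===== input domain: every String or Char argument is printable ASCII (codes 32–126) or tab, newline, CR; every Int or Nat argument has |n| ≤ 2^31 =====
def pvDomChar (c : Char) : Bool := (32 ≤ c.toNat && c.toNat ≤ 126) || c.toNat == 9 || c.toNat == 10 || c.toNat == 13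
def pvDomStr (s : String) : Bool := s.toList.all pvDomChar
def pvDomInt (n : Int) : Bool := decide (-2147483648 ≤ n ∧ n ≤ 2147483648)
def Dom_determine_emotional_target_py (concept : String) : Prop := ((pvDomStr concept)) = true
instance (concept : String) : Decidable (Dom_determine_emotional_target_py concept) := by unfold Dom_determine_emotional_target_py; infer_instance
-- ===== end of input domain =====

-- B replaces A's keyword-containment elif ladder by a single left-to-right scan over the
-- string's positions, testing keyword prefixes at each position and tracking the minimum
-- priority found (alternative algorithm, same results).


-- ===== PORT A =====
def determine_emotional_target_py (concept : String) : String :=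
  if ["horror", "scary", "dark"].any (fun word => PySem.Str.isIn word concept) then
    "Fear, tension, unease"
  else if ["adventure", "explore"].any (fun word => PySem.Str.isIn word concept) then
    "Wonder, curiosity, excitement"
  else if ["puzzle", "strategy"].any (fun word => PySem.Str.isIn word concept) then
    "Satisfaction, accomplishment"
  else if ["casual", "relaxing"].any (fun word => PySem.Str.isIn word concept) then
    "Calm, peaceful, meditative"
  else
    "Engagement, enjoyment"

-- ===== PORT B =====
-- _KEYWORD_PRIORITY (keywords as char lists, priorities as the list indices of _TARGETS)
def pvKeywordPriority : List (List Char × Nat) :=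
  [ ("horror".toList, 0), ("scary".toList, 0), ("dark".toList, 0),
    ("adventure".toList, 1), ("explore".toList, 1),
    ("puzzle".toList, 2), ("strategy".toList, 2),
    ("casual".toList, 3), ("relaxing".toList, 3) ]

def pvTargets : List String :=
  [ "Fear, tension, unease", "Wonder, curiosity, excitement",
    "Satisfaction, accomplishment", "Calm, peaceful, meditative",
    "Engagement, enjoyment" ]

-- inner loop body: 'for kw, prio in _KEYWORD_PRIORITY: if prio < best and concept.startswith(kw, i): best = prio'
-- (Python's concept.startswith(kw, i) with 0 ≤ i is exactly 'kw is a prefix of the i-th suffix')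
def pvInner (s : List Char) (i : Nat) (best : Nat) : Nat :=
  pvKeywordPriority.foldl
    (fun b kp => if kp.2 < b && PySem.Chars.startswith (s.drop i) kp.1 then kp.2 else b) best

-- outer loop: 'for i in range(len(concept))', accumulator 'best' starting at 4
def pvBest (s : List Char) : Nat :=
  (List.range s.length).foldl (fun b i => pvInner s i b) 4

def determine_emotional_target_py_alt (concept : String) : String :=
  -- '_TARGETS[best]': best is always < 5, so List.getD is exact here
  pvTargets.getD (pvBest concept.toList) "Engagement, enjoyment"

-- ===== PRECONDITION & SPEC =====
def Spec_determine_emotional_target_py (concept : String) (out : String) : Prop := out = determine_emotional_target_py_alt concept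
instance (concept : String) (out : String) : Decidable (Spec_determine_emotional_target_py concept out) := by unfold Spec_determine_emotional_target_py; infer_instance

-- ===== CLAIM (what is proved, stated in full; the proofs are below) =====
def Claim_equal_determine_emotional_target_py : Prop := ∀ (concept : String), Dom_determine_emotional_target_py concept → Spec_determine_emotional_target_py concept (determine_emotional_target_py concept)

-- ===== LEMMAS AND PROOFS =====

-- the 'prio < best' test makes each step a min with the matching priority
theorem pv_fold_eq_minfold (c : List Char → Bool) (l : List (List Char × Nat)) (b : Nat) :
    List.foldl (fun b kp => if kp.2 < b && c kp.1 then kp.2 else b) b l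
      = List.foldl (fun b kp => if c kp.1 then min b kp.2 else b) b l := by
  induction l generalizing b with
  | nil => rfl
  | cons kp l ih =>
      simp only [List.foldl_cons]
      rw [show (if kp.2 < b && c kp.1 then kp.2 else b) = (if c kp.1 then min b kp.2 else b) by
        cases c kp.1
        · simp
        · simp
          split <;> omega]
      exact ih _

-- characterisation of the min-fold: the result is ≤ p iff the seed is, or some matching entry is
theorem pv_minfold_le_iff (c : List Char → Bool) (l : List (List Char × Nat)) (b p : Nat) :
    (List.foldl (fun b kp => if c kp.1 then min b kp.2 else b) b l ≤ p)
      ↔ b ≤ p ∨ ∃ kp ∈ l, c kp.1 = true ∧ kp.2 ≤ p := by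
  induction l generalizing b with
  | nil => simp
  | cons kp l ih =>
      simp only [List.foldl_cons, ih, List.mem_cons]
      cases h : c kp.1
      · simp [h]
      · simp [h]
        tauto

theorem pvInner_le_iff (s : List Char) (i b p : Nat) :
    pvInner s i b ≤ p ↔
      b ≤ p ∨ ∃ kp ∈ pvKeywordPriority, PySem.Chars.startswith (s.drop i) kp.1 = true ∧ kp.2 ≤ p := by
  unfold pvInner
  rw [pv_fold_eq_minfold, pv_minfold_le_iff]

theorem pv_outer_le_iff (s : List Char) (p : Nat) (r : List Nat) (b : Nat) :
    (r.foldl (fun b i => pvInner s i b) b ≤ p) ↔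
      b ≤ p ∨ ∃ i ∈ r, ∃ kp ∈ pvKeywordPriority,
        PySem.Chars.startswith (s.drop i) kp.1 = true ∧ kp.2 ≤ p := by
  induction r generalizing b with
  | nil => simp
  | cons i r ih =>
      simp only [List.foldl_cons, ih, pvInner_le_iff, List.mem_cons]
      constructor
      · rintro ((h | ⟨kp, hkp, h⟩) | ⟨j, hj, kp, hkp, h⟩)
        · exact Or.inl h
        · exact Or.inr ⟨i, Or.inl rfl, kp, hkp, h⟩
        · exact Or.inr ⟨j, Or.inr hj, kp, hkp, h⟩
      · rintro (h | ⟨j, (rfl | hj), kp, hkp, h⟩)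
        · exact Or.inl (Or.inl h)
        · exact Or.inl (Or.inr ⟨kp, hkp, h⟩)
        · exact Or.inr ⟨j, hj, kp, hkp, h⟩

theorem pvBest_le_iff (s : List Char) (p : Nat) :
    pvBest s ≤ p ↔
      4 ≤ p ∨ ∃ i ∈ List.range s.length, ∃ kp ∈ pvKeywordPriority,
        PySem.Chars.startswith (s.drop i) kp.1 = true ∧ kp.2 ≤ p := by
  unfold pvBest
  exact pv_outer_le_iff s p _ 4

-- bounded position scan of a nonempty keyword = substring containment
theorem pv_scan_iff_isIn (s kw : List Char) (hk : kw ≠ []) :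
    (∃ i ∈ List.range s.length, PySem.Chars.startswith (s.drop i) kw = true)
      ↔ PySem.Chars.isIn kw s = true := by
  rw [← PySem.Chars.exists_prefix_drop_iff_isIn]
  constructor
  · rintro ⟨i, -, h⟩
    exact ⟨i, (PySem.Chars.startswith_iff _ _).1 h⟩
  · rintro ⟨j, h⟩
    refine ⟨j, ?_, (PySem.Chars.startswith_iff _ _).2 h⟩
    rw [List.mem_range]
    by_contra hj
    have : s.drop j = [] := List.drop_eq_nil_of_le (by omega)
    rw [this] at h
    exact hk (List.prefix_nil.mp h)

theorem pvBest_le_iff' (s : List Char) (p : Nat) :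
    pvBest s ≤ p ↔
      4 ≤ p ∨ ∃ kp ∈ pvKeywordPriority, kp.2 ≤ p ∧ PySem.Chars.isIn kp.1 s = true := by
  have hne : ∀ kp ∈ pvKeywordPriority, kp.1 ≠ [] := by decide
  rw [pvBest_le_iff]
  constructor
  · rintro (h | ⟨i, hi, kp, hkp, hst, hle⟩)
    · exact Or.inl h
    · exact Or.inr ⟨kp, hkp, hle, (pv_scan_iff_isIn s kp.1 (hne kp hkp)).1 ⟨i, hi, hst⟩⟩
  · rintro (h | ⟨kp, hkp, hle, hin⟩)
    · exact Or.inl h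
    · obtain ⟨i, hi, hst⟩ := (pv_scan_iff_isIn s kp.1 (hne kp hkp)).2 hin
      exact Or.inr ⟨i, hi, kp, hkp, hst, hle⟩

-- ===== VERDICT (by name: the statement is the Claim_ definition above) =====
theorem determine_emotional_target_py_spec : Claim_equal_determine_emotional_target_py := by
  intro concept _
  unfold Spec_determine_emotional_target_py determine_emotional_target_py determine_emotional_target_py_alt
  simp only [List.any_cons, List.any_nil, Bool.or_false, PySem.Str.isIn_eq]
  have h0 : pvBest concept.toList ≤ 0 ↔
      (PySem.Chars.isIn "horror".toList concept.toList
        || (PySem.Chars.isIn "scary".toList concept.toList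
            || PySem.Chars.isIn "dark".toList concept.toList)) = true := by
    rw [pvBest_le_iff']; simp [pvKeywordPriority]
  have h1 : pvBest concept.toList ≤ 1 ↔
      ((PySem.Chars.isIn "horror".toList concept.toList
        || (PySem.Chars.isIn "scary".toList concept.toList
            || PySem.Chars.isIn "dark".toList concept.toList))
        || (PySem.Chars.isIn "adventure".toList concept.toList
            || PySem.Chars.isIn "explore".toList concept.toList)) = true := by
    rw [pvBest_le_iff']; simp [pvKeywordPriority, or_assoc]
  have h2 : pvBest concept.toList ≤ 2 ↔
      (((PySem.Chars.isIn "horror".toList concept.toList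
        || (PySem.Chars.isIn "scary".toList concept.toList
            || PySem.Chars.isIn "dark".toList concept.toList))
        || (PySem.Chars.isIn "adventure".toList concept.toList
            || PySem.Chars.isIn "explore".toList concept.toList))
        || (PySem.Chars.isIn "puzzle".toList concept.toList
            || PySem.Chars.isIn "strategy".toList concept.toList)) = true := by
    rw [pvBest_le_iff']; simp [pvKeywordPriority, or_assoc]
  have h3 : pvBest concept.toList ≤ 3 ↔
      ((((PySem.Chars.isIn "horror".toList concept.toList
        || (PySem.Chars.isIn "scary".toList concept.toList
            || PySem.Chars.isIn "dark".toList concept.toList))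
        || (PySem.Chars.isIn "adventure".toList concept.toList
            || PySem.Chars.isIn "explore".toList concept.toList))
        || (PySem.Chars.isIn "puzzle".toList concept.toList
            || PySem.Chars.isIn "strategy".toList concept.toList))
        || (PySem.Chars.isIn "casual".toList concept.toList
            || PySem.Chars.isIn "relaxing".toList concept.toList)) = true := by
    rw [pvBest_le_iff']; simp [pvKeywordPriority, or_assoc]
  have h4 : pvBest concept.toList ≤ 4 := (pvBest_le_iff' concept.toList 4).mpr (Or.inl le_rfl)
  by_cases hb0 : pvBest concept.toList ≤ 0
  · rw [if_pos (h0.mp hb0), show pvBest concept.toList = 0 from Nat.le_zero.mp hb0]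
    rfl
  · rw [if_neg (fun h => hb0 (h0.mpr h))]
    by_cases hb1 : pvBest concept.toList ≤ 1
    · have hg : (PySem.Chars.isIn "adventure".toList concept.toList
          || PySem.Chars.isIn "explore".toList concept.toList) = true := by
        have := h1.mp hb1
        rcases Bool.or_eq_true_iff.mp this with h | h
        · exact absurd (h0.mpr h) hb0
        · exact h
      rw [if_pos hg, show pvBest concept.toList = 1 by omega]
      rfl
    · rw [if_neg (fun h => hb1 (h1.mpr (Bool.or_eq_true_iff.mpr (Or.inr h))))]
      by_cases hb2 : pvBest concept.toList ≤ 2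
      · have hg : (PySem.Chars.isIn "puzzle".toList concept.toList
            || PySem.Chars.isIn "strategy".toList concept.toList) = true := by
          have := h2.mp hb2
          rcases Bool.or_eq_true_iff.mp this with h | h
          · exact absurd (h1.mpr h) hb1
          · exact h
        rw [if_pos hg, show pvBest concept.toList = 2 by omega]
        rfl
      · rw [if_neg (fun h => hb2 (h2.mpr (Bool.or_eq_true_iff.mpr (Or.inr h))))]
        by_cases hb3 : pvBest concept.toList ≤ 3
        · have hg : (PySem.Chars.isIn "casual".toList concept.toList
              || PySem.Chars.isIn "relaxing".toList concept.toList) = true := by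
            have := h3.mp hb3
            rcases Bool.or_eq_true_iff.mp this with h | h
            · exact absurd (h2.mpr h) hb2
            · exact h
          rw [if_pos hg, show pvBest concept.toList = 3 by omega]
          rfl
        · rw [if_neg (fun h => hb3 (h3.mpr (Bool.or_eq_true_iff.mpr (Or.inr h))))]
          rw [show pvBest concept.toList = 4 by omega]
          rfl
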